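-- pv_equiv track=rewrite | github.com/dan21az/FP-python | Python_archivos/Practicas y clases/08_Ejemplos Lazos.py | contar_hashtags
-- ===== SOURCE A (Python) =====
-- def contar_hashtags(lista_textos):
--   lista_palabras=[] # Se crea una lista vacia en donde se almacenaran todas las palabras que comiencen con '#'
--   lista_veces=[] # Se crea una lista vacia en donde se almacenaran el numero de veces que aparece cada palabra
--   for texto in lista_textos: # Se recorre cada texto de la lista de textos
--     for palabra in texto.lower().split():# A cada texto se lo transforma en una lista de palabras por medio de split, y se recorre dicha lista. En el ejemplo se guardan las palabras en minusculas por lo que aplicamos lower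
--       if palabra.startswith('#'): # Solo nos interesan las palabras que comienzan con #
--         palabra = palabra[1:] # En el ejemplo se guardan las palabras sin el primer caracter (#), por lo que aplicamos slicing
--         if palabra not in lista_palabras:  # Si es la primera vez que aparece la palabra
--           lista_palabras.append(palabra) # se la agrega a la lista de palabras y
--           lista_veces.append(1)          # se agrega 1 como el numero de veces que ha aparecido
--         else: # Si la palabra ya ha aparecido antes, se debe buscar el indice en el cual esta guardada en la lista_palabras y el numero de veces que aparece en lista_veces en dicho indice se actualiza sumandole 1
--           lista_veces[lista_palabras.index(palabra)]+=1
--   return lista_palabras,lista_veces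
-- ===== SOURCE B (Python) =====
-- def contar_hashtags(lista_textos):
--     # Pass 1: extract every hashtag word (lowercased, '#' stripped) in order.
--     words = []
--     for texto in lista_textos:
--         for w in texto.lower().split():
--             if w.startswith('#'):
--                 words.append(w[1:])
--     # Pass 2: tabulate frequencies.
--     counts = {}
--     for w in words:
--         counts[w] = counts.get(w, 0) + 1
--     # Pass 3: first-appearance order, then read the counts off the table.
--     palabras = list(dict.fromkeys(words))
--     veces = [counts[p] for p in palabras]
--     return palabras, veces
-- ===== Notes on version B (the rewrite author's own statement) =====
-- stated objective: alternative
-- what changed: Replaces A's single interleaved loop (membership test plus .index scan per repeated word) by a three-pass pipeline: extract all hashtag words, tabulate counts in a dict, then dedup for first-appearance order and read counts off the table.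
import Mathlib
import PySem

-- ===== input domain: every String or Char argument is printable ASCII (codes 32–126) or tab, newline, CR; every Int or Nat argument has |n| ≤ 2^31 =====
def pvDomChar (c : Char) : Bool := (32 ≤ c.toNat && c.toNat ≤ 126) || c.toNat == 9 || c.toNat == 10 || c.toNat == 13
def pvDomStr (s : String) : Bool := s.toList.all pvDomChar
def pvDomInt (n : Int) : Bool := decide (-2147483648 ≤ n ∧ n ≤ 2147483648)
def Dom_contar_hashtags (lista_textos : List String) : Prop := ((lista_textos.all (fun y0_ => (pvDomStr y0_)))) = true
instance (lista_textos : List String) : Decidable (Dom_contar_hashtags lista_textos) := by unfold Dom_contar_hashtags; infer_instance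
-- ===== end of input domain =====

-- B replaces A's interleaved scan (membership test plus .index per repeated word) by an
-- extract → tabulate → order pipeline over the same word stream (alternative decomposition).

-- ===== PORT A =====
-- one interleaved loop; on a repeated word the count at lista_palabras.index(palabra) is bumped
-- (.index always succeeds here since the branch guarantees membership; ported with getD 0)
def contar_hashtags (lista_textos : List String) : List String × List Int :=
  lista_textos.foldl (fun s texto =>
    (PySem.Str.split₀ (PySem.Str.lower texto)).foldl (fun s palabra =>
      if PySem.Str.startswith palabra "#" then
        let palabra := PySem.Str.slice palabra (some 1) none
        if palabra ∉ s.1 then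
          (s.1 ++ [palabra], s.2 ++ [1])
        else
          let i : Int := (((PySem.List.index? s.1 palabra).getD 0 : Nat) : Int)
          (s.1, PySem.List.pySetD s.2 i (PySem.List.pyGetD s.2 i 0 + 1))
      else s) s) ([], [])

-- ===== PORT B =====
def contar_hashtags_alt (lista_textos : List String) : List String × List Int :=
  let words := lista_textos.foldl (fun acc texto =>
    (PySem.Str.split₀ (PySem.Str.lower texto)).foldl (fun acc w =>
      if PySem.Str.startswith w "#" then acc ++ [PySem.Str.slice w (some 1) none] else acc) acc) []
  let counts := words.foldl (fun d w => d.insert w (d.getD w 0 + 1)) PySem.Dict.empty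
  let palabras := PySem.List.dedup words
  let veces := palabras.map (fun p => counts.getD p 0)  -- counts[p]: p ∈ words, so the key is present
  (palabras, veces)

-- ===== PRECONDITION & SPEC =====
def Spec_contar_hashtags (lista_textos : List String) (out : List String × List Int) : Prop := out = contar_hashtags_alt lista_textos
instance (lista_textos : List String) (out : List String × List Int) : Decidable (Spec_contar_hashtags lista_textos out) := by unfold Spec_contar_hashtags; infer_instance

-- ===== CLAIM (what is proved, stated in full; the proofs are below) =====
def Claim_equal_contar_hashtags : Prop := ∀ (lista_textos : List String), Dom_contar_hashtags lista_textos → Spec_contar_hashtags lista_textos (contar_hashtags lista_textos)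

-- ===== LEMMAS AND PROOFS =====

-- the stream of hashtag words both programs process
def pvWords (lista_textos : List String) : List String :=
  lista_textos.flatMap (fun t =>
    ((PySem.Str.split₀ (PySem.Str.lower t)).filter (fun w => PySem.Str.startswith w "#")).map
      (fun w => PySem.Str.slice w (some 1) none))

-- A's core step on a stripped hashtag word
def pvStep (s : List String × List Int) (w : String) : List String × List Int :=
  if w ∉ s.1 then
    (s.1 ++ [w], s.2 ++ [1])
  else
    let i : Int := (((PySem.List.index? s.1 w).getD 0 : Nat) : Int)
    (s.1, PySem.List.pySetD s.2 i (PySem.List.pyGetD s.2 i 0 + 1))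

lemma pv_foldl_foldl {α β γ : Type} (l : List α) (g : α → List β) (f : γ → β → γ) (init : γ) :
    l.foldl (fun s t => (g t).foldl f s) init = (l.flatMap g).foldl f init := by
  induction l generalizing init with
  | nil => rfl
  | cons t l ih => simp [List.flatMap_cons, List.foldl_append, ih]

lemma pvA_eq_fold (lista_textos : List String) :
    contar_hashtags lista_textos = (pvWords lista_textos).foldl pvStep ([], []) := by
  unfold contar_hashtags pvWords
  rw [pv_foldl_foldl]
  rw [List.foldl_flatMap]
  rw [List.foldl_flatMap]
  congr 1
  funext s t
  rw [List.foldl_map, ← PySem.List.foldl_if_eq_foldl_filter (fun w => PySem.Str.startswith w "#")]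
  rfl

lemma pv_map_set (d : List String) (k : Nat) (w : String) (f g : String → Int)
    (hd : d.Nodup) (hk : k < d.length) (hw : d[k] = w)
    (hgw : g w = f w + 1) (hg : ∀ p ∈ d, p ≠ w → g p = f p) :
    (d.map f).set k (f w + 1) = d.map g := by
  induction d generalizing k with
  | nil => simp at hk
  | cons a d ih =>
    cases k with
    | zero =>
      simp at hw; subst hw
      simp [← hgw]
      intro p hp
      exact (hg p (List.mem_cons_of_mem _ hp)
        (fun h => (List.nodup_cons.mp hd).1 (h ▸ hp))).symm
    | succ k =>
      have hk' : k < d.length := by simpa using hk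
      have hw' : d[k] = w := by simpa using hw
      have hmem : w ∈ d := hw' ▸ List.getElem_mem hk'
      simp only [List.map_cons, List.set_cons_succ]
      rw [ih k (List.nodup_cons.mp hd).2 hk' hw'
        (fun p hp hne => hg p (List.mem_cons_of_mem _ hp) hne)]
      rw [hg a (List.mem_cons_self) (fun h => (List.nodup_cons.mp hd).1 (h ▸ hmem))]

lemma pv_invariant (ws pre : List String) :
    ws.foldl pvStep (PySem.List.dedup pre, (PySem.List.dedup pre).map (fun p => (pre.count p : Int)))
      = (PySem.List.dedup (pre ++ ws), (PySem.List.dedup (pre ++ ws)).map (fun p => ((pre ++ ws).count p : Int))) := by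
  induction ws generalizing pre with
  | nil => simp
  | cons w ws ih =>
    have hstep : pvStep (PySem.List.dedup pre, (PySem.List.dedup pre).map (fun p => (pre.count p : Int))) w
        = (PySem.List.dedup (pre ++ [w]), (PySem.List.dedup (pre ++ [w])).map (fun p => ((pre ++ [w]).count p : Int))) := by
      have hded : PySem.List.dedup (pre ++ [w]) = PySem.Set.add (PySem.List.dedup pre) w := by
        simp [PySem.Set.ofList_append_singleton]
      by_cases hw : w ∈ pre
      · have hmem : w ∈ PySem.List.dedup pre := by
          simp [PySem.Set.mem_ofList, hw]
        have hd2 : PySem.List.dedup (pre ++ [w]) = PySem.List.dedup pre := by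
          rw [hded]; exact PySem.Set.add_of_mem hmem
        -- the index into dedup pre
        obtain ⟨k, hk⟩ : ∃ k, PySem.List.index? (PySem.List.dedup pre) w = some k := by
          have := (PySem.List.index?_isSome_iff (xs := PySem.List.dedup pre) (v := w)).mpr hmem
          exact ⟨_, Option.eq_some_of_isSome this⟩
        obtain ⟨hklt, hkget, _⟩ := PySem.List.getElem_of_index?_eq_some hk
        unfold pvStep
        simp only [hmem, not_true_eq_false, if_false, hk, Option.getD_some, hd2]
        refine Prod.ext ?_ ?_
        · rfl
        · have hlen : k < ((PySem.List.dedup pre).map (fun p => (pre.count p : Int))).length := by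
            simpa using hklt
          rw [PySem.List.pySetD_natCast, PySem.List.pyGetD_natCast]
          have hget : ((PySem.List.dedup pre).map (fun p => (pre.count p : Int))).getD k 0
              = (pre.count w : Int) := by
            rw [List.getD_eq_getElem _ _ hlen]
            simp only [List.getElem_map]
            exact congrArg (fun x => ((List.count x pre : Nat) : Int)) hkget
          rw [hget]
          exact pv_map_set _ k w _ _ (by simp [PySem.Set.nodup_ofList]) hklt hkget
            (by simp [List.count_append])
            (fun p hp hne => by simp [List.count_append, Ne.symm hne])
      · have hmem : w ∉ PySem.List.dedup pre := by
          simp [PySem.Set.mem_ofList, hw]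
        have hd2 : PySem.List.dedup (pre ++ [w]) = PySem.List.dedup pre ++ [w] := by
          rw [hded]; exact PySem.Set.add_of_not_mem hmem
        unfold pvStep
        simp only [hmem, not_false_eq_true, if_true, hd2]
        refine Prod.ext rfl ?_
        rw [List.map_append]
        refine congrArg₂ _ ?_ ?_
        · exact List.map_congr_left (fun p hp => by
            have hpw : p ≠ w := fun h => hmem (h ▸ hp)
            simp [List.count_append, Ne.symm hpw])
        · simp [List.count_append, List.count_eq_zero_of_not_mem hw]
    rw [List.foldl_cons, hstep]
    have := ih (pre := pre ++ [w])
    simpa [List.append_assoc] using this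

lemma pvB_eq (lista_textos : List String) :
    contar_hashtags_alt lista_textos
      = (PySem.List.dedup (pvWords lista_textos),
         (PySem.List.dedup (pvWords lista_textos)).map (fun p => ((pvWords lista_textos).count p : Int))) := by
  unfold contar_hashtags_alt
  have hwords : lista_textos.foldl (fun acc texto =>
      (PySem.Str.split₀ (PySem.Str.lower texto)).foldl (fun acc w =>
        if PySem.Str.startswith w "#" then acc ++ [PySem.Str.slice w (some 1) none] else acc) acc) []
      = pvWords lista_textos := by
    unfold pvWords
    rw [pv_foldl_foldl, PySem.List.foldl_append_if]
    simp [List.filter_flatMap, List.map_flatMap]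
  simp only [hwords]
  refine Prod.ext rfl ?_
  apply List.map_congr_left
  intro p hp
  rw [PySem.Dict.getD_foldl_insert_add_one]
  simp

-- ===== VERDICT (by name: the statement is the Claim_ definition above) =====
theorem contar_hashtags_spec : Claim_equal_contar_hashtags := by
  intro lista_textos _
  unfold Spec_contar_hashtags
  rw [pvA_eq_fold, pvB_eq]
  have := pv_invariant (pvWords lista_textos) []
  simpa using this
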